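-- pv_equiv track=rewrite | github.com/kyungjinleelee/Algorithm | 백준/Silver/1495. 기타리스트/기타리스트.py | change_volume
-- ===== SOURCE A (Python) =====
-- def change_volume(n, s, m, v):
--     # 현재 가능한 볼륨을 저장할 집합
--     current_volumes = {s}
--
--     for i in range(n):
--         next_volumes = set()
--         for vol in current_volumes:
--             # 볼륨 더했을 때
--             if 0 <= vol + v[i] <= m:
--                 next_volumes.add(vol + v[i])
--             # 볼륨 뺐을 때
--             if 0 <= vol - v[i] <= m:
--                 next_volumes.add(vol - v[i])
--
--         # 다음 단계로 넘어갈 수 있는 볼륨 상태가 없으면 -1 출력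
--         if not next_volumes:
--             return -1
--         # 가능한 볼륨 상태 갱신
--         current_volumes = next_volumes
--
--     # 최종 가능한 볼륨 중 최대값 반환
--     return max(current_volumes)
-- ===== SOURCE B (Python) =====
-- def change_volume(n, s, m, v):
--     # Backward value DP: f[vol] = max final volume reachable from step i at
--     # volume vol (None if infeasible), computed from i = n down to 1; the
--     # answer is read off by taking the first step from s against f.
--     if n <= 0:
--         return s
--     f = [vol for vol in range(m + 1)]  # at step n, best = the volume itself
--     for i in range(n - 1, 0, -1):
--         vi = v[i]
--         g = []
--         for vol in range(m + 1):
--             best = None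
--             for w in (vol + vi, vol - vi):
--                 if 0 <= w <= m and f[w] is not None and (best is None or f[w] > best):
--                     best = f[w]
--             g.append(best)
--         f = g
--     vi = v[0]
--     best = None
--     for w in (s + vi, s - vi):
--         if 0 <= w <= m and f[w] is not None and (best is None or f[w] > best):
--             best = f[w]
--     return -1 if best is None else best
-- ===== Notes on version B (the rewrite author's own statement) =====
-- stated objective: alternative
-- what changed: A runs a forward level-by-level BFS over sets of reachable volumes and takes max of the final set; B runs the recurrence backwards, building for i = n..1 a table f[vol] = maximum final volume attainable from step i at volume vol (None if infeasible), and reads the answer by taking the single first step from s against that table, so no reachable set and no final max are ever computed.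
-- outside the precondition, e.g. on change_volume(2, 0, 5, [100]): A returns -1, B raises IndexError
import Mathlib
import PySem

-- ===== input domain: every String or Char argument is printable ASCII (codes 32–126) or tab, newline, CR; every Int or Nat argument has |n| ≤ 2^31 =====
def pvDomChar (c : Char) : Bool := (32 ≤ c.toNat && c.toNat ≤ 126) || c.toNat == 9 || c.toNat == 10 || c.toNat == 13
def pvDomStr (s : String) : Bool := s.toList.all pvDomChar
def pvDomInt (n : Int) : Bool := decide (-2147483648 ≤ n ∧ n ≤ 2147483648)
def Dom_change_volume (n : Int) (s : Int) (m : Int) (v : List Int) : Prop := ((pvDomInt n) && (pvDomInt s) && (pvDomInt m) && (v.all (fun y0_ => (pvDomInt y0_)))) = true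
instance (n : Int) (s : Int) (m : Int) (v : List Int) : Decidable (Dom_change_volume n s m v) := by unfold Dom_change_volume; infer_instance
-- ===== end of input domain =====

-- A runs a forward level-by-level BFS over sets of reachable volumes and takes max of the
-- final set; B runs the recurrence backwards, building for i = n..1 a table
-- f[vol] = maximum final volume attainable from step i at volume vol (none if infeasible)
-- and reading the answer by one first step from s (objective: alternative; same
-- return value on all inputs admitted by Pre_).

-- ===== PORT A =====
-- inner 'for vol in current_volumes' loop building next_volumes (a Python set)
def pvA_inner (m vi : Int) (cur : PySem.Set Int) : PySem.Set Int :=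
  cur.foldl (fun nxt vol =>
    let nxt := if 0 ≤ vol + vi ∧ vol + vi ≤ m then PySem.Set.add nxt (vol + vi) else nxt
    if 0 ≤ vol - vi ∧ vol - vi ≤ m then PySem.Set.add nxt (vol - vi) else nxt)
    PySem.Set.empty

-- 'for i in range(n)' with the early 'return -1' (none = returned -1), as structural recursion;
-- v[i] via pyGetD: the IndexError case (n > len(v) reached) is excluded by Pre_change_volume
def pvA_loop (m : Int) (v : List Int) : List Int → PySem.Set Int → Option (PySem.Set Int)
  | [], cur => some cur
  | i :: t, cur =>
    let nxt := pvA_inner m (PySem.List.pyGetD v i 0) cur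
    if nxt = [] then none else pvA_loop m v t nxt

def change_volume (n : Int) (s : Int) (m : Int) (v : List Int) : Int :=
  match pvA_loop m v (PySem.List.pyRange 0 n 1) (PySem.Set.ofList [s]) with
  | none => -1
  | some cur => (PySem.List.max? cur (fun x => x)).getD 0   -- cur is provably nonempty; max(set)

-- ===== PORT B =====
-- 'if 0 <= w <= m and f[w] is not None and (best is None or f[w] > best): best = f[w]'
-- (f holds optional best-final values; 'vol for vol in range(m+1)' is the all-some table)
def pvBUpd (m : Int) (f : List (Option Int)) (best : Option Int) (w : Int) : Option Int :=
  if 0 ≤ w ∧ w ≤ m then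
    match PySem.List.pyGetD f w none with
    | none => best
    | some fw =>
      match best with
      | none => some fw
      | some b => if fw > b then some fw else best
  else best

-- 'g = []; for vol in range(m+1): … g.append(best)' — one backward DP step
def pvBstep (m vi : Int) (f : List (Option Int)) : List (Option Int) :=
  (PySem.List.pyRange 0 (m + 1) 1).map (fun vol => [vol + vi, vol - vi].foldl (pvBUpd m f) none)

def change_volume_alt (n : Int) (s : Int) (m : Int) (v : List Int) : Int :=
  if n ≤ 0 then s
  else
    -- f = [vol for vol in range(m+1)] (every entry present, i.e. some)
    let f0 : List (Option Int) := (PySem.List.pyRange 0 (m + 1) 1).map some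
    -- 'for i in range(n-1, 0, -1): … f = g'
    let f := (PySem.List.pyRange (n - 1) 0 (-1)).foldl
      (fun f i => pvBstep m (PySem.List.pyGetD v i 0) f) f0
    -- first step from s against the table
    let vi := PySem.List.pyGetD v 0 0
    match [s + vi, s - vi].foldl (pvBUpd m f) none with
    | none => -1
    | some b => b

-- ===== PRECONDITION & SPEC =====
-- Pre_ excludes n > len(v): there v[i] raises IndexError in B always and in A whenever no
-- earlier level becomes empty (A returns -1 on some such inputs, B raises; see cites).
def Pre_change_volume (n : Int) (s : Int) (m : Int) (v : List Int) : Prop := n ≤ (v.length : Int)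
instance (n : Int) (s : Int) (m : Int) (v : List Int) : Decidable (Pre_change_volume n s m v) := by unfold Pre_change_volume; infer_instance

def pvWitness_change_volume : Int × Int × Int × List Int := (3, 5, 10, [2, 7, 3])

def Spec_change_volume (n : Int) (s : Int) (m : Int) (v : List Int) (out : Int) : Prop := out = change_volume_alt n s m v
instance (n : Int) (s : Int) (m : Int) (v : List Int) (out : Int) : Decidable (Spec_change_volume n s m v out) := by unfold Spec_change_volume; infer_instance

-- ===== CLAIM (what is proved, stated in full; the proofs are below) =====
def Claim_equal_change_volume : Prop := ∀ (n : Int) (s : Int) (m : Int) (v : List Int), Dom_change_volume n s m v → Pre_change_volume n s m v → Spec_change_volume n s m v (change_volume n s m v)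

-- ===== LEMMAS AND PROOFS =====

-- y is reachable as final volume by k legal steps from volume x, first step using v[i]
def pvReach (m : Int) (v : List Int) : Nat → Int → Int → Int → Prop
  | 0, _, x, y => y = x
  | k+1, i, x, y => ∃ w : Int,
      ((w = x + PySem.List.pyGetD v i 0 ∨ w = x - PySem.List.pyGetD v i 0) ∧ 0 ≤ w ∧ w ≤ m) ∧
      pvReach m v k (i+1) w y

-- o is the (optional) maximum of the set described by P
def pvOptMax (P : Int → Prop) (o : Option Int) : Prop :=
  match o with
  | none => ∀ y, ¬ P y
  | some b => P b ∧ ∀ y, P y → y ≤ b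

lemma pvOptMax_congr {P Q : Int → Prop} (h : ∀ y, P y ↔ Q y) {o : Option Int}
    (ho : pvOptMax P o) : pvOptMax Q o := by
  cases o with
  | none => exact fun y hq => ho y ((h y).mpr hq)
  | some b => exact ⟨(h b).mp ho.1, fun y hq => ho.2 y ((h y).mpr hq)⟩

lemma pvReach_succ_iff (m : Int) (v : List Int) (k : Nat) (i x y : Int) :
    pvReach m v (k+1) i x y ↔
      ((0 ≤ x + PySem.List.pyGetD v i 0 ∧ x + PySem.List.pyGetD v i 0 ≤ m) ∧
        pvReach m v k (i+1) (x + PySem.List.pyGetD v i 0) y) ∨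
      ((0 ≤ x - PySem.List.pyGetD v i 0 ∧ x - PySem.List.pyGetD v i 0 ≤ m) ∧
        pvReach m v k (i+1) (x - PySem.List.pyGetD v i 0) y) := by
  constructor
  · rintro ⟨w, ⟨(rfl | rfl), hw⟩, hr⟩
    · exact Or.inl ⟨hw, hr⟩
    · exact Or.inr ⟨hw, hr⟩
  · rintro (⟨hw, hr⟩ | ⟨hw, hr⟩)
    · exact ⟨_, ⟨Or.inl rfl, hw⟩, hr⟩
    · exact ⟨_, ⟨Or.inr rfl, hw⟩, hr⟩

-- ---- A-side: the loop's final set is exactly the reach set (or none iff it is empty) ----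

lemma pvA_inner_mem (m vi : Int) (cur : List Int) (acc : PySem.Set Int) (w : Int) :
    (w ∈ cur.foldl (fun nxt vol =>
      let nxt := if 0 ≤ vol + vi ∧ vol + vi ≤ m then PySem.Set.add nxt (vol + vi) else nxt
      if 0 ≤ vol - vi ∧ vol - vi ≤ m then PySem.Set.add nxt (vol - vi) else nxt) acc) ↔
    (w ∈ acc ∨ ∃ j ∈ cur, (w = j + vi ∨ w = j - vi) ∧ 0 ≤ w ∧ w ≤ m) := by
  induction cur generalizing acc with
  | nil => simp
  | cons c t ih =>
    rw [List.foldl_cons, ih]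
    have hstep : (w ∈ (let nxt := if 0 ≤ c + vi ∧ c + vi ≤ m then PySem.Set.add acc (c + vi) else acc
        if 0 ≤ c - vi ∧ c - vi ≤ m then PySem.Set.add nxt (c - vi) else nxt)) ↔
        (w ∈ acc ∨ ((w = c + vi ∨ w = c - vi) ∧ 0 ≤ w ∧ w ≤ m)) := by
      dsimp only
      split_ifs with hm hp hp
      · simp only [PySem.Set.mem_add]
        constructor
        · rintro ((h | rfl) | rfl)
          · exact Or.inl h
          · exact Or.inr ⟨Or.inl rfl, hp⟩
          · exact Or.inr ⟨Or.inr rfl, hm⟩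
        · rintro (h | ⟨(rfl | rfl), hr⟩)
          · exact Or.inl (Or.inl h)
          · exact Or.inl (Or.inr rfl)
          · exact Or.inr rfl
      · simp only [PySem.Set.mem_add]
        constructor
        · rintro (h | rfl)
          · exact Or.inl h
          · exact Or.inr ⟨Or.inr rfl, hm⟩
        · rintro (h | ⟨(rfl | rfl), hr⟩)
          · exact Or.inl h
          · exact absurd hr hp
          · exact Or.inr rfl
      · simp only [PySem.Set.mem_add]
        constructor
        · rintro (h | rfl)
          · exact Or.inl h
          · exact Or.inr ⟨Or.inl rfl, hp⟩
        · rintro (h | ⟨(rfl | rfl), hr⟩)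
          · exact Or.inl h
          · exact Or.inr rfl
          · exact absurd hr hm
      · constructor
        · exact Or.inl
        · rintro (h | ⟨(rfl | rfl), hr⟩)
          · exact h
          · exact absurd hr hp
          · exact absurd hr hm
    rw [hstep]
    constructor
    · rintro ((h | h) | ⟨j, hj, hh⟩)
      · left; exact h
      · right; exact ⟨c, List.mem_cons_self .., h⟩
      · right; exact ⟨j, List.mem_cons_of_mem _ hj, hh⟩
    · rintro (h | ⟨j, hj, hh⟩)
      · left; left; exact h
      · rcases List.mem_cons.mp hj with rfl | hj
        · left; right; exact hh
        · right; exact ⟨j, hj, hh⟩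

lemma pvA_inner_mem' (m vi : Int) (cur : List Int) (w : Int) :
    w ∈ pvA_inner m vi cur ↔ ∃ j ∈ cur, (w = j + vi ∨ w = j - vi) ∧ 0 ≤ w ∧ w ≤ m := by
  unfold pvA_inner
  rw [pvA_inner_mem]
  simp [PySem.Set.empty]

lemma pvA_char (m : Int) (v : List Int) :
    ∀ (k : Nat) (i b : Int), b = i + (k : Int) → ∀ cur : List Int, cur ≠ [] →
    (pvA_loop m v (PySem.List.pyRange i b 1) cur = none ∧
      ∀ y, ¬ ∃ x ∈ cur, pvReach m v k i x y) ∨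
    (∃ S, pvA_loop m v (PySem.List.pyRange i b 1) cur = some S ∧ S ≠ [] ∧
      ∀ y, (y ∈ S ↔ ∃ x ∈ cur, pvReach m v k i x y)) := by
  intro k
  induction k with
  | zero =>
    intro i b hb cur hne
    rw [hb]
    rw [PySem.List.pyRange_one_eq_nil (by omega)]
    refine Or.inr ⟨cur, rfl, hne, fun y => ⟨fun h => ⟨y, h, rfl⟩, ?_⟩⟩
    rintro ⟨x, hx, hr⟩
    have hyx : y = x := hr
    exact hyx ▸ hx
  | succ k ih =>
    intro i b hb cur hne
    rw [PySem.List.pyRange_one_cons (by omega)]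
    rw [pvA_loop]
    set vi := PySem.List.pyGetD v i 0 with hvi
    by_cases hemp : pvA_inner m vi cur = []
    · rw [if_pos hemp]
      refine Or.inl ⟨rfl, fun y ⟨x, hx, hr⟩ => ?_⟩
      obtain ⟨w, hw, _⟩ := hr
      exact (List.ne_nil_of_mem ((pvA_inner_mem' m vi cur w).mpr ⟨x, hx, hw⟩)) hemp
    · rw [if_neg hemp]
      have htrans : ∀ y, (∃ x ∈ pvA_inner m vi cur, pvReach m v k (i+1) x y) ↔
          (∃ x ∈ cur, pvReach m v (k+1) i x y) := by
        intro y
        constructor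
        · rintro ⟨w, hw, hr⟩
          obtain ⟨j, hj, hd⟩ := (pvA_inner_mem' m vi cur w).mp hw
          exact ⟨j, hj, w, hd, hr⟩
        · rintro ⟨x, hx, w, hd, hr⟩
          exact ⟨w, (pvA_inner_mem' m vi cur w).mpr ⟨x, hx, hd⟩, hr⟩
      rcases ih (i+1) b (by omega) (pvA_inner m vi cur) hemp with ⟨h1, h2⟩ | ⟨S, h1, h2, h3⟩
      · exact Or.inl ⟨h1, fun y hy => h2 y ((htrans y).mpr hy)⟩
      · exact Or.inr ⟨S, h1, h2, fun y => (h3 y).trans (htrans y)⟩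

-- ---- B-side: each table entry is the optional maximum of its reach set ----

lemma pvBUpd_char (m : Int) (v : List Int) (k : Nat) (iS : Int) (f : List (Option Int))
    (hf : ∀ vol : Int, 0 ≤ vol ∧ vol ≤ m →
      pvOptMax (pvReach m v k iS vol) (PySem.List.pyGetD f vol none))
    (P : Int → Prop) (best : Option Int) (hb : pvOptMax P best) (w : Int) :
    pvOptMax (fun y => P y ∨ ((0 ≤ w ∧ w ≤ m) ∧ pvReach m v k iS w y)) (pvBUpd m f best w) := by
  unfold pvBUpd
  by_cases hw : 0 ≤ w ∧ w ≤ m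
  · rw [if_pos hw]
    have hfw := hf w hw
    cases hfo : PySem.List.pyGetD f w none with
    | none =>
      rw [hfo] at hfw
      dsimp only
      cases best with
      | none =>
        intro y hy
        rcases hy with hy | ⟨_, hy⟩
        · exact hb y hy
        · exact hfw y hy
      | some b =>
        refine ⟨Or.inl hb.1, fun y hy => ?_⟩
        rcases hy with hy | ⟨_, hy⟩
        · exact hb.2 y hy
        · exact absurd hy (hfw y)
    | some fw =>
      rw [hfo] at hfw
      dsimp only
      cases best with
      | none =>
        dsimp only
        refine ⟨Or.inr ⟨hw, hfw.1⟩, fun y hy => ?_⟩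
        rcases hy with hy | ⟨_, hy⟩
        · exact absurd hy (hb y)
        · exact hfw.2 y hy
      | some b =>
        dsimp only
        by_cases hgt : fw > b
        · rw [if_pos hgt]
          refine ⟨Or.inr ⟨hw, hfw.1⟩, fun y hy => ?_⟩
          rcases hy with hy | ⟨_, hy⟩
          · exact le_of_lt (lt_of_le_of_lt (hb.2 y hy) hgt)
          · exact hfw.2 y hy
        · rw [if_neg hgt]
          refine ⟨Or.inl hb.1, fun y hy => ?_⟩
          rcases hy with hy | ⟨_, hy⟩
          · exact hb.2 y hy
          · exact le_trans (hfw.2 y hy) (by omega)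
  · rw [if_neg hw]
    apply pvOptMax_congr (P := P) _ hb
    intro y
    constructor
    · exact Or.inl
    · rintro (hy | ⟨hww, _⟩)
      · exact hy
      · exact absurd hww hw

-- the two-candidate fold ('for w in (x+vi, x-vi)') computes the depth-(k+1) best from x
lemma pvFold2_char (m : Int) (v : List Int) (k : Nat) (i x : Int) (f : List (Option Int))
    (hf : ∀ vol : Int, 0 ≤ vol ∧ vol ≤ m →
      pvOptMax (pvReach m v k (i+1) vol) (PySem.List.pyGetD f vol none)) :
    pvOptMax (pvReach m v (k+1) i x)
      ([x + PySem.List.pyGetD v i 0, x - PySem.List.pyGetD v i 0].foldl (pvBUpd m f) none) := by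
  have h0 : pvOptMax (fun _ => False) (none : Option Int) := fun y hy => hy
  have h1 := pvBUpd_char m v k (i+1) f hf _ none h0 (x + PySem.List.pyGetD v i 0)
  have h2 := pvBUpd_char m v k (i+1) f hf _ _ h1 (x - PySem.List.pyGetD v i 0)
  rw [List.foldl_cons, List.foldl_cons, List.foldl_nil]
  refine pvOptMax_congr (fun y => ?_) h2
  rw [pvReach_succ_iff]
  constructor
  · rintro ((hF | ⟨hw, hr⟩) | ⟨hw, hr⟩)
    · exact absurd hF not_false
    · exact Or.inl ⟨hw, hr⟩
    · exact Or.inr ⟨hw, hr⟩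
  · rintro (⟨hw, hr⟩ | ⟨hw, hr⟩)
    · exact Or.inl (Or.inr ⟨hw, hr⟩)
    · exact Or.inr ⟨hw, hr⟩

-- the countdown fold from index b+t down to b+1 yields the depth-t table for step b+1
lemma pvBtab (m : Int) (v : List Int) :
    ∀ (t : Nat) (b : Int), ∀ vol : Int, 0 ≤ vol ∧ vol ≤ m →
    pvOptMax (pvReach m v t (b + 1) vol)
      (PySem.List.pyGetD
        ((PySem.List.pyRange (b + (t : Int)) b (-1)).foldl
          (fun f i => pvBstep m (PySem.List.pyGetD v i 0) f)
          ((PySem.List.pyRange 0 (m + 1) 1).map some))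
        vol none) := by
  intro t
  induction t with
  | zero =>
    intro b vol hvol
    rw [show b + ((0:Nat) : Int) = b by omega, PySem.List.pyRange_neg_one_eq_nil (le_refl b),
      List.foldl_nil,
      PySem.List.pyGetD_map_pyRange_of_nonneg some (m + 1) vol none hvol.1 (by omega)]
    exact ⟨rfl, fun y hy => le_of_eq hy⟩
  | succ t ih =>
    intro b vol hvol
    have hcast : (((t + 1 : Nat)) : Int) = (t : Int) + 1 := by push_cast; ring
    rw [hcast, show b + ((t : Int) + 1) = (b + 1) + (t : Int) by ring]
    have hsplit : PySem.List.pyRange ((b + 1) + (t : Int)) b (-1) =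
        PySem.List.pyRange ((b + 1) + (t : Int)) (b + 1) (-1) ++ [b + 1] := by
      rw [PySem.List.pyRange_neg_one_eq_reverse, PySem.List.pyRange_neg_one_eq_reverse,
        PySem.List.pyRange_one_cons (a := b + 1) (by omega), List.reverse_cons]
    rw [hsplit, List.foldl_append, List.foldl_cons, List.foldl_nil]
    have hstep : ∀ g : List (Option Int),
        PySem.List.pyGetD (pvBstep m (PySem.List.pyGetD v (b+1) 0) g) vol none =
          [vol + PySem.List.pyGetD v (b+1) 0, vol - PySem.List.pyGetD v (b+1) 0].foldl
            (pvBUpd m g) none := by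
      intro g
      unfold pvBstep
      exact PySem.List.pyGetD_map_pyRange_of_nonneg _ (m + 1) vol none hvol.1 (by omega)
    rw [hstep]
    exact pvFold2_char m v t (b + 1) vol _ (ih (b + 1))

-- max(S) equals b when b ∈ S is an upper bound of S
lemma pv_max_eq (S : List Int) (b : Int) (hb : b ∈ S) (hub : ∀ y ∈ S, y ≤ b) :
    (PySem.List.max? S (fun x => x)).getD 0 = b := by
  obtain ⟨c, t, rfl⟩ := List.exists_cons_of_ne_nil (List.ne_nil_of_mem hb)
  rw [PySem.List.max?_id_cons]
  have hM : t.foldl max c ∈ c :: t := by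
    rcases PySem.List.foldl_max_mem t c with hh | hh
    · rw [hh]; exact List.mem_cons_self ..
    · exact List.mem_cons_of_mem _ hh
  have hble : b ≤ t.foldl max c := by
    rcases List.mem_cons.mp hb with rfl | hbt
    · exact (PySem.List.le_foldl_max t b).1
    · exact (PySem.List.le_foldl_max t c).2 b hbt
  have : t.foldl max c ≤ b := hub _ hM
  simpa using le_antisymm this hble

-- ===== VERDICT (by name: the statement is the Claim_ definition above) =====
theorem change_volume_spec : Claim_equal_change_volume := by
  unfold Claim_equal_change_volume
  intro n s m v _ _
  unfold Spec_change_volume change_volume change_volume_alt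
  dsimp only
  by_cases hn : n ≤ 0
  · rw [if_pos hn, PySem.List.pyRange_one_eq_nil hn]
    have hA : pvA_loop m v [] (PySem.Set.ofList [s]) = some (PySem.Set.ofList [s]) := rfl
    rw [hA]
    show (PySem.List.max? (PySem.Set.ofList [s]) (fun x => x)).getD 0 = s
    exact pv_max_eq _ s (by simp [PySem.Set.ofList, PySem.Set.add, PySem.Set.empty])
      (by simp [PySem.Set.ofList, PySem.Set.add, PySem.Set.empty])
  · rw [if_neg hn, show (PySem.Set.ofList [s] : PySem.Set Int) = [s] from rfl]
    -- B's result is pvOptMax of the n-step reach predicate from s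
    have htab := pvBtab m v (n - 1).toNat 0
    rw [show (0 : Int) + ((n-1).toNat : Int) = n - 1 by omega] at htab
    have hB : pvOptMax (pvReach m v ((n-1).toNat + 1) 0 s)
        ([s + PySem.List.pyGetD v 0 0, s - PySem.List.pyGetD v 0 0].foldl
          (pvBUpd m ((PySem.List.pyRange (n - 1) 0 (-1)).foldl
            (fun f i => pvBstep m (PySem.List.pyGetD v i 0) f)
            ((PySem.List.pyRange 0 (m + 1) 1).map some))) none) := by
      refine pvFold2_char m v (n-1).toNat 0 s _ ?_
      intro vol hvol
      exact htab vol hvol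
    have hk : (n - 1).toNat + 1 = n.toNat := by omega
    rw [hk] at hB
    -- A's loop over range(0, n)
    rcases pvA_char m v n.toNat 0 n (by omega) [s] (by simp) with ⟨h1, h2⟩ | ⟨S, h1, h2, h3⟩
    · -- A returns -1; B's optional max must be none
      rw [h1]
      cases hres : [s + PySem.List.pyGetD v 0 0, s - PySem.List.pyGetD v 0 0].foldl
          (pvBUpd m ((PySem.List.pyRange (n - 1) 0 (-1)).foldl
            (fun f i => pvBstep m (PySem.List.pyGetD v i 0) f)
            ((PySem.List.pyRange 0 (m + 1) 1).map some))) none with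
      | none => rfl
      | some b =>
        rw [hres] at hB
        exact absurd ⟨s, List.mem_singleton_self s, hB.1⟩ (h2 b)
    · rw [h1]
      cases hres : [s + PySem.List.pyGetD v 0 0, s - PySem.List.pyGetD v 0 0].foldl
          (pvBUpd m ((PySem.List.pyRange (n - 1) 0 (-1)).foldl
            (fun f i => pvBstep m (PySem.List.pyGetD v i 0) f)
            ((PySem.List.pyRange 0 (m + 1) 1).map some))) none with
      | none =>
        rw [hres] at hB
        obtain ⟨y, hy⟩ := List.exists_mem_of_ne_nil _ h2
        obtain ⟨x, hx, hr⟩ := (h3 y).mp hy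
        rw [List.mem_singleton] at hx
        subst hx
        exact absurd hr (hB y)
      | some b =>
        rw [hres] at hB
        show (PySem.List.max? S (fun x => x)).getD 0 = b
        refine pv_max_eq S b ((h3 b).mpr ⟨s, List.mem_singleton_self s, hB.1⟩) ?_
        intro y hy
        obtain ⟨x, hx, hr⟩ := (h3 y).mp hy
        rw [List.mem_singleton] at hx
        subst hx
        exact hB.2 y hr
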